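-- pv_equiv track=rewrite | github.com/Alvin-Furman-CS-Classroom/project-2-ai-system-tori-madigan | src/module6_solution_explanation.py | _constraint_type_summary
-- ===== SOURCE A (Python) =====
-- from typing import Any, Dict, List, Tuple
--
-- def _constraint_type_summary(constraints: List[Dict[str, Any]]) -> str:
--     if not constraints:
--         return "The puzzle has no explicit puzzle constraints listed."
--     counts: Dict[str, int] = {}
--     for c in constraints:
--         t = c.get("type", "unknown")
--         counts[t] = counts.get(t, 0) + 1
--     parts = [f"{n} {t.replace('_', ' ')}" for t, n in sorted(counts.items())]
--     return "Stated clues include: " + ", ".join(parts) + "."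
-- ===== SOURCE B (Python) =====
-- from typing import Any, Dict, List, Tuple
--
-- def _constraint_type_summary(constraints: List[Dict[str, Any]]) -> str:
--     if not constraints:
--         return "The puzzle has no explicit puzzle constraints listed."
--     types = sorted(c.get("type", "unknown") for c in constraints)
--     parts = []
--     i = 0
--     n = len(types)
--     while i < n:
--         j = i
--         while j < n and types[j] == types[i]:
--             j += 1
--         parts.append(f"{j - i} {types[i].replace('_', ' ')}")
--         i = j
--     return "Stated clues include: " + ", ".join(parts) + "."
-- ===== Notes on version B (the rewrite author's own statement) =====
-- stated objective: alternative
-- what changed: Replaces A's dict-of-counts plus sorted(items()) with sorting the extracted type list first and one adjacent-run grouping scan that emits each run's length directly.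
import Mathlib
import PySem

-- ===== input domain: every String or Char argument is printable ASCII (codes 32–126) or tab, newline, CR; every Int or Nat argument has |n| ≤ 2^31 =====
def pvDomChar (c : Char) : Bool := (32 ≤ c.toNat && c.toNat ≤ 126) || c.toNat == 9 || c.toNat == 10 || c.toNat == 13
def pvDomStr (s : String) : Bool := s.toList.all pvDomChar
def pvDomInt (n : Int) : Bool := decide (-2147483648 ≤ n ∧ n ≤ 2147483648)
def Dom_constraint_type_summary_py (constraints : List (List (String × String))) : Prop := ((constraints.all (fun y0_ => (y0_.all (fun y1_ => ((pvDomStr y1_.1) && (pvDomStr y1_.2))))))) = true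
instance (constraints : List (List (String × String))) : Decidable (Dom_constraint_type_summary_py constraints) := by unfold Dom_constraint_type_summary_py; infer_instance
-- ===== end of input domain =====

-- B sorts the extracted type list and does one adjacent-run grouping scan instead of A's count-dict + sorted(items()); objective: alternative decomposition, same result.

-- ===== PORT A =====
def constraint_type_summary_py (constraints : List (List (String × String))) : String :=
  if constraints = [] then
    "The puzzle has no explicit puzzle constraints listed."
  else
    let counts : PySem.Dict String Int := constraints.foldl (fun d c =>
      let t := (PySem.Dict.mk c).getD "type" "unknown"
      d.insert t (d.getD t 0 + 1)) PySem.Dict.empty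
    let parts := (PySem.List.sorted2 counts.items (fun p => p.1) (fun p => p.2)).map
      (fun p => PySem.Int.toStr p.2 ++ " " ++ PySem.Str.replace p.1 "_" " ")
    "Stated clues include: " ++ PySem.Str.join ", " parts ++ "."

-- ===== PORT B =====
-- the inner while loop of Source B: the run at the head has length 1 + (equal prefix of the tail); continue after the run
def pvRuns (l : List String) : List (String × Nat) :=
  match l with
  | [] => []
  | x :: xs =>
      (x, 1 + (xs.takeWhile (fun y => y == x)).length) :: pvRuns (xs.dropWhile (fun y => y == x))
termination_by l.length
decreasing_by
  simp only [List.length_cons]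
  exact Nat.lt_succ_of_le (List.length_dropWhile_le _ _)

def constraint_type_summary_py_alt (constraints : List (List (String × String))) : String :=
  if constraints = [] then
    "The puzzle has no explicit puzzle constraints listed."
  else
    let types := PySem.List.sorted (constraints.map (fun c => (PySem.Dict.mk c).getD "type" "unknown")) (fun t => t)
    let parts := (pvRuns types).map
      (fun p => PySem.Int.toStr (p.2 : Int) ++ " " ++ PySem.Str.replace p.1 "_" " ")
    "Stated clues include: " ++ PySem.Str.join ", " parts ++ "."

-- ===== PRECONDITION & SPEC =====
def Spec_constraint_type_summary_py (constraints : List (List (String × String))) (out : String) : Prop := out = constraint_type_summary_py_alt constraints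
instance (constraints : List (List (String × String))) (out : String) : Decidable (Spec_constraint_type_summary_py constraints out) := by unfold Spec_constraint_type_summary_py; infer_instance

-- ===== CLAIM (what is proved, stated in full; the proofs are below) =====
def Claim_equal_constraint_type_summary_py : Prop := ∀ (constraints : List (List (String × String))), Dom_constraint_type_summary_py constraints → Spec_constraint_type_summary_py constraints (constraint_type_summary_py constraints)

-- ===== LEMMAS AND PROOFS =====

-- lexicographic ≤ on (String × Int), the order Python's tuple sort in A uses
def pvLexLE (a b : String × Int) : Prop := a.1 < b.1 ∨ (a.1 = b.1 ∧ a.2 ≤ b.2)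

-- the comparison sorted2 uses
def pvBefore (a b : String × Int) : Bool :=
  decide (a.1 < b.1) || (!decide (b.1 < a.1) && decide (a.2 < b.2))

lemma pvLexLE_total (a b : String × Int) (h : pvBefore a b = false) : pvLexLE b a := by
  unfold pvBefore at h
  simp only [Bool.or_eq_false_iff, Bool.and_eq_false_iff, Bool.not_eq_false',
    decide_eq_false_iff_not, decide_eq_true_eq] at h
  obtain ⟨h1, h2⟩ := h
  rcases h2 with h2 | h2
  · exact Or.inl h2
  · by_cases hba : b.1 < a.1
    · exact Or.inl hba
    · exact Or.inr ⟨le_antisymm (le_of_not_gt h1) (le_of_not_gt hba), le_of_not_gt h2⟩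

lemma pvLexLE_of_before (a b : String × Int) (h : pvBefore a b = true) : pvLexLE a b := by
  unfold pvBefore at h
  simp only [Bool.or_eq_true, Bool.and_eq_true, Bool.not_eq_true', decide_eq_false_iff_not,
    decide_eq_true_eq] at h
  rcases h with h | ⟨h1, h2⟩
  · exact Or.inl h
  · by_cases hab : a.1 < b.1
    · exact Or.inl hab
    · exact Or.inr ⟨le_antisymm (not_lt.mp h1) (not_lt.mp hab), le_of_lt h2⟩

lemma pvLexLE_trans {a b c : String × Int} (h1 : pvLexLE a b) (h2 : pvLexLE b c) : pvLexLE a c := by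
  rcases h1 with h1 | ⟨h1, h1'⟩ <;> rcases h2 with h2 | ⟨h2, h2'⟩
  · exact Or.inl (lt_trans h1 h2)
  · exact Or.inl (h2 ▸ h1)
  · exact Or.inl (h1 ▸ h2)
  · exact Or.inr ⟨h1.trans h2, le_trans h1' h2'⟩

lemma pvLexLE_antisymm {a b : String × Int} (h1 : pvLexLE a b) (h2 : pvLexLE b a) : a = b := by
  rcases h1 with h1 | ⟨h1, h1'⟩ <;> rcases h2 with h2 | ⟨h2, h2'⟩
  · exact absurd h2 (lt_asymm h1)
  · exact absurd h1 (h2 ▸ lt_irrefl _)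
  · exact absurd h2 (h1 ▸ lt_irrefl _)
  · exact Prod.ext h1 (le_antisymm h1' h2')

lemma pvInsertBy_pairwise (x : String × Int) (ys : List (String × Int))
    (h : ys.Pairwise pvLexLE) :
    (PySem.List.insertBy pvBefore x ys).Pairwise pvLexLE := by
  induction ys with
  | nil => simp [PySem.List.insertBy]
  | cons y t ih =>
    rw [PySem.List.insertBy]
    rcases h with _ | ⟨hy, ht⟩
    by_cases hb : pvBefore x y = true
    · simp only [hb, if_true]
      refine List.Pairwise.cons ?_ (List.Pairwise.cons hy ht)
      intro z hz
      rcases List.mem_cons.mp hz with rfl | hz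
      · exact pvLexLE_of_before _ _ hb
      · exact pvLexLE_trans (pvLexLE_of_before _ _ hb) (hy z hz)
    · simp only [hb]
      refine List.Pairwise.cons ?_ (ih ht)
      intro z hz
      rcases (PySem.List.insertBy_mem_iff _ _ _ _).mp hz with rfl | hz
      · exact pvLexLE_total _ _ (Bool.eq_false_iff.mpr hb)
      · exact hy z hz

lemma pvFoldl_insertBy_pairwise (xs : List (String × Int)) (acc : List (String × Int))
    (h : acc.Pairwise pvLexLE) :
    (xs.foldl (fun acc x => PySem.List.insertBy pvBefore x acc) acc).Pairwise pvLexLE := by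
  induction xs generalizing acc with
  | nil => exact h
  | cons x t ih => exact ih _ (pvInsertBy_pairwise x acc h)

lemma pvSorted2_eq (xs : List (String × Int)) :
    PySem.List.sorted2 xs (fun p => p.1) (fun p => p.2) =
      xs.foldl (fun acc x => PySem.List.insertBy pvBefore x acc) [] := rfl

-- ofList commutes with filter
lemma pvOfList_filter (p : String → Bool) (xs : List String) :
    PySem.Set.ofList (xs.filter p) = (PySem.Set.ofList xs).filter p := by
  induction xs with
  | nil => rfl
  | cons y t ih =>
    rw [PySem.Set.ofList_cons]
    by_cases hp : p y
    · rw [List.filter_cons_of_pos hp, PySem.Set.ofList_cons, ih]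
      simp only [List.filter_cons_of_pos hp, PySem.Set.discard, List.filter_filter]
      congr 1
      apply List.filter_congr
      intro a _
      rw [Bool.and_comm]
    · have hp' : ¬ p y = true := hp
      rw [List.filter_cons_of_neg hp', ih, PySem.Set.discard,
        List.filter_cons_of_neg hp', List.filter_filter]
      apply List.filter_congr
      intro a _
      by_cases hay : a = y
      · subst hay; simp [Bool.eq_false_iff.mpr hp']
      · simp [hay]

lemma pvTakeDrop (x : String) (xs : List String)
    (h : (x :: xs).Pairwise (fun a b => a ≤ b)) :
    xs.takeWhile (fun y => y == x) = xs.filter (fun y => y == x) ∧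
    xs.dropWhile (fun y => y == x) = xs.filter (fun y => !(y == x)) := by
  induction xs with
  | nil => exact ⟨rfl, rfl⟩
  | cons y t ih =>
    rcases h with _ | ⟨hx, ht⟩
    by_cases hy : y = x
    · subst hy
      have h' : (y :: t).Pairwise (fun a b => a ≤ b) := by
        refine List.Pairwise.cons ?_ (ht.tail)
        intro z hz
        exact hx z (List.mem_cons_of_mem _ hz)
      obtain ⟨h1, h2⟩ := ih h'
      constructor
      · simp only [List.takeWhile_cons, List.filter_cons, BEq.rfl, if_true, h1]
      · simp only [List.dropWhile_cons, List.filter_cons, BEq.rfl, if_true, h2]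
        simp
    · have hxy : x < y := lt_of_le_of_ne (hx y List.mem_cons_self) (Ne.symm hy)
      have hall : ∀ z ∈ y :: t, ¬ z = x := by
        intro z hz
        rcases List.mem_cons.mp hz with rfl | hz
        · exact hy
        · rcases ht with _ | ⟨hy2, _⟩
          intro hzx
          exact absurd (hzx ▸ hy2 z hz) (not_le.mpr hxy)
      constructor
      · rw [List.takeWhile_cons_of_neg (by simp [hy]), List.filter_eq_nil_iff.mpr]
        intro z hz
        simp [hall z hz]
      · rw [List.dropWhile_cons_of_neg (by simp [hy]), List.filter_eq_self.mpr]
        intro z hz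
        simp [hall z hz]

lemma pvRuns_sorted (l : List String) (h : l.Pairwise (fun a b => a ≤ b)) :
    pvRuns l = (PySem.Set.ofList l).map (fun k => (k, l.count k)) := by
  induction l using pvRuns.induct with
  | case1 => simp [pvRuns, PySem.Set.ofList_nil]
  | case2 x xs ih =>
    obtain ⟨htw, hdw⟩ := pvTakeDrop x xs h
    rw [pvRuns, PySem.Set.ofList_cons]
    have hdwp : (xs.dropWhile (fun y => y == x)).Pairwise (fun a b => a ≤ b) := by
      rw [hdw]; exact List.Pairwise.sublist List.filter_sublist h.tail
    rw [ih hdwp]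
    rw [List.map_cons]
    congr 1
    · -- head: counts agree
      congr 1
      rw [htw, ← List.count_eq_length_filter, List.count_cons_self, Nat.add_comm]
    · -- tail
      have hset : PySem.Set.ofList (xs.dropWhile (fun y => y == x)) = (PySem.Set.ofList xs).discard x := by
        rw [hdw, PySem.Set.discard, ← pvOfList_filter]
      rw [hset]
      apply List.map_congr_left
      intro k hk
      have hkx : ¬ (k == x) = true := by
        have := List.of_mem_filter hk
        simpa using this
      have hkx' : k ≠ x := by simpa using hkx
      congr 1
      rw [hdw, List.count_filter (by simp [hkx])]
      simp [Ne.symm hkx']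

-- the sorted distinct keys, the common backbone of both parts lists
lemma pvSK_pairwise_lt (ts : List String) :
    (PySem.List.sorted (PySem.Set.ofList ts) (fun x => x)).Pairwise (fun a b => a < b) := by
  have h1 := PySem.List.sorted_pairwise (PySem.Set.ofList ts) (fun x => x)
  have h2 : (PySem.List.sorted (PySem.Set.ofList ts) (fun x => x)).Nodup :=
    (PySem.List.sorted_perm _ _ _).nodup_iff.mpr (PySem.Set.nodup_ofList ts)
  exact (h1.and h2).imp (fun ⟨hle, hne⟩ => lt_of_le_of_ne hle hne)

-- A's sorted items list equals the map over the sorted distinct keys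
lemma pvA_items (ts : List String) :
    PySem.List.sorted2 (PySem.Dict.counter ts).items (fun p => p.1) (fun p => p.2) =
      (PySem.List.sorted (PySem.Set.ofList ts) (fun x => x)).map
        (fun k => (k, (ts.count k : Int))) := by
  set SK := PySem.List.sorted (PySem.Set.ofList ts) (fun x => x) with hSK
  set M := SK.map (fun k => (k, (ts.count k : Int))) with hM
  have hperm : (PySem.List.sorted2 (PySem.Dict.counter ts).items (fun p => p.1) (fun p => p.2)).Perm M := by
    refine (PySem.List.sorted2_perm _ _ _ _).trans ?_
    rw [PySem.Dict.items_counter]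
    exact ((PySem.List.sorted_perm _ _ _).map _).symm
  have hp1 : (PySem.List.sorted2 (PySem.Dict.counter ts).items (fun p => p.1) (fun p => p.2)).Pairwise pvLexLE := by
    rw [pvSorted2_eq]
    exact pvFoldl_insertBy_pairwise _ _ List.Pairwise.nil
  have hp2 : M.Pairwise pvLexLE := by
    rw [hM, List.pairwise_map]
    exact (pvSK_pairwise_lt ts).imp (fun h => Or.inl h)
  exact List.Perm.eq_of_pairwise (fun a b _ _ h1 h2 => pvLexLE_antisymm h1 h2) hp1 hp2 hperm

lemma pvOfList_sublist (xs : List String) : (PySem.Set.ofList xs).Sublist xs := by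
  induction xs with
  | nil => simp [PySem.Set.ofList_nil]
  | cons x t ih =>
    rw [PySem.Set.ofList_cons, PySem.Set.discard]
    exact (List.Sublist.trans List.filter_sublist ih).cons₂ x

-- B's runs list equals the map over the same sorted distinct keys
lemma pvB_runs (ts : List String) :
    pvRuns (PySem.List.sorted ts (fun t => t)) =
      (PySem.List.sorted (PySem.Set.ofList ts) (fun x => x)).map
        (fun k => (k, ts.count k)) := by
  set S := PySem.List.sorted ts (fun t => t) with hS
  have hsp : S.Pairwise (fun a b => a ≤ b) := PySem.List.sorted_pairwise ts (fun t => t)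
  rw [pvRuns_sorted S hsp]
  have hkeys : PySem.Set.ofList S = PySem.List.sorted (PySem.Set.ofList ts) (fun x => x) := by
    apply Eq.symm
    apply PySem.List.sorted_eq_of_perm_of_pairwise_lt
    · rw [List.perm_ext_iff_of_nodup (PySem.Set.nodup_ofList S) (PySem.Set.nodup_ofList ts)]
      intro a
      rw [PySem.Set.mem_ofList, PySem.Set.mem_ofList]
      exact (PySem.List.sorted_perm ts (fun t => t) false).mem_iff
    · have h1 : (PySem.Set.ofList S).Sublist S := pvOfList_sublist S
      exact ((List.Pairwise.sublist h1 hsp).and (PySem.Set.nodup_ofList S)).imp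
        (fun ⟨hle, hne⟩ => lt_of_le_of_ne hle hne)
  rw [hkeys]
  apply List.map_congr_left
  intro k _
  congr 1
  exact (PySem.List.sorted_perm ts (fun t => t) false).count_eq k

-- the claim
theorem pv_main (constraints : List (List (String × String))) :
    constraint_type_summary_py constraints = constraint_type_summary_py_alt constraints := by
  unfold constraint_type_summary_py constraint_type_summary_py_alt
  by_cases hc : constraints = []
  · simp [hc]
  · simp only [hc, if_false]
    set ts := constraints.map (fun c => (PySem.Dict.mk c).getD "type" "unknown") with hts
    have hcounts : constraints.foldl (fun d c =>
        let t := (PySem.Dict.mk c).getD "type" "unknown"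
        d.insert t (d.getD t 0 + 1)) (PySem.Dict.empty : PySem.Dict String Int) =
        PySem.Dict.counter ts := by
      rw [hts]
      rw [show (constraints.foldl (fun d c =>
          let t := (PySem.Dict.mk c).getD "type" "unknown"
          d.insert t (d.getD t 0 + 1)) (PySem.Dict.empty : PySem.Dict String Int)) =
          ((constraints.map (fun c => (PySem.Dict.mk c).getD "type" "unknown")).foldl
            (fun d t => d.insert t (d.getD t 0 + 1)) PySem.Dict.empty) from
          (List.foldl_map (f := fun c => (PySem.Dict.mk c).getD "type" "unknown")
            (g := fun (d : PySem.Dict String Int) (t : String) => d.insert t (d.getD t 0 + 1))).symm]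
      exact PySem.Dict.foldl_insert_getD_add_one_eq_counter _
    rw [hcounts]
    congr 1
    congr 1
    rw [pvA_items ts, pvB_runs ts, List.map_map, List.map_map]
    rfl

-- ===== VERDICT (by name: the statement is the Claim_ definition above) =====
theorem constraint_type_summary_py_spec : Claim_equal_constraint_type_summary_py := by
  intro constraints _
  unfold Spec_constraint_type_summary_py
  exact pv_main constraints
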